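-- pv_equiv track=rewrite | github.com/miccai5340-blip/Flow_Matching_Motor_Impairment_Prediction | cnn3d_fa_speed_vel.py | _parse_exp_modality
-- ===== SOURCE A (Python) =====
-- _RAW_MOD_EXPS = ("fa", "md", "rd", "ad", "wm", "gm", "mri")  # raw modality - must match MODALITY
--
-- _MOD_SUFFIX_MAP = {"speed": "fa_speed", "vel": "fa_vel", "velspeed": "fa_velspeed", "speed_vel": "fa_speed_vel"}
--
-- def _parse_exp_modality(exp: str):
--     """wm_speed -> (wm, fa_speed), md_vel -> (md, fa_vel). Otherwise (None, exp)."""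
--     for mod in _RAW_MOD_EXPS:
--         prefix = mod + "_"
--         if exp.startswith(prefix):
--             suffix = exp[len(prefix):]
--             if suffix in _MOD_SUFFIX_MAP:
--                 return mod, _MOD_SUFFIX_MAP[suffix]
--     return None, exp
-- ===== SOURCE B (Python) =====
-- _RAW_MOD_EXPS = ("fa", "md", "rd", "ad", "wm", "gm", "mri")  # raw modality - must match MODALITY
--
-- _MOD_SUFFIX_MAP = {"speed": "fa_speed", "vel": "fa_vel", "velspeed": "fa_velspeed", "speed_vel": "fa_speed_vel"}
--
-- def _parse_exp_modality(exp: str):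
--     """wm_speed -> (wm, fa_speed), md_vel -> (md, fa_vel). Otherwise (None, exp)."""
--     mod, sep, suffix = exp.partition("_")
--     if sep and mod in _RAW_MOD_EXPS and suffix in _MOD_SUFFIX_MAP:
--         return mod, _MOD_SUFFIX_MAP[suffix]
--     return None, exp
-- ===== Notes on version B (the rewrite author's own statement) =====
-- stated objective: simpler
-- what changed: Instead of scanning the 7 modality prefixes with startswith and re-slicing the string for each, B splits the name once at its first underscore with partition and does two membership lookups on the pieces.
import Mathlib
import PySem

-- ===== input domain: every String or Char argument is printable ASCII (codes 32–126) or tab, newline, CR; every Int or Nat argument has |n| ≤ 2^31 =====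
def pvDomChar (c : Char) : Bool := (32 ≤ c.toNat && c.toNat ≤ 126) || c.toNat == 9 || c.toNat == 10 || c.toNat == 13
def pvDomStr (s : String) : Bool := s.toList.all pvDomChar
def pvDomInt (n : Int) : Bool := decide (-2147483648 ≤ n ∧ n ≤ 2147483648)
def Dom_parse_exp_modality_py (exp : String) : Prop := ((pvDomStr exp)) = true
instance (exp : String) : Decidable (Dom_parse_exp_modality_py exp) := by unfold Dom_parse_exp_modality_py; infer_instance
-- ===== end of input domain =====

-- B replaces A's scan over the 7 "mod_" prefixes (with a fresh slice per hit) by ONE split at the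
-- first underscore (str.partition) followed by two membership lookups; objective: simpler.

-- module constants, shared by both Pythons (on List Char)
def pvRawMods : List (List Char) :=
  ["fa".toList, "md".toList, "rd".toList, "ad".toList, "wm".toList, "gm".toList, "mri".toList]

def pvSuffixMap : PySem.Dict (List Char) (List Char) :=
  PySem.Dict.mk [("speed".toList, "fa_speed".toList), ("vel".toList, "fa_vel".toList),
                 ("velspeed".toList, "fa_velspeed".toList), ("speed_vel".toList, "fa_speed_vel".toList)]

-- ===== PORT A =====
-- A's for-loop over _RAW_MOD_EXPS: startswith, slice off the prefix, dict membership + lookup.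
def pvALoop (cs : List Char) : List (List Char) → Option (List Char) × List Char
  | [] => (none, cs)
  | mod :: rest =>
    let pre := mod ++ ['_']
    if PySem.Chars.startswith cs pre then
      let suffix := PySem.List.slice cs (some (pre.length : Int)) none
      if pvSuffixMap.contains suffix then (some mod, pvSuffixMap.getD suffix [])
      else pvALoop cs rest
    else pvALoop cs rest

def parse_exp_modality_py (exp : String) : Option String × String :=
  let r := pvALoop exp.toList pvRawMods
  (r.1.map String.ofList, String.ofList r.2)

-- ===== PORT B =====
-- B: mod, sep, suffix = exp.partition("_")  (split at the FIRST underscore), then two lookups.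
def parse_exp_modality_py_alt (exp : String) : Option String × String :=
  let cs := exp.toList
  let i := PySem.Chars.find cs ['_']
  let (mod, sep, suffix) :=
    if i = -1 then (cs, ([] : List Char), ([] : List Char))
    else (cs.take i.toNat, ['_'], cs.drop (i.toNat + 1))
  if !sep.isEmpty && pvRawMods.contains mod && pvSuffixMap.contains suffix then
    (some (String.ofList mod), String.ofList (pvSuffixMap.getD suffix []))
  else (none, exp)

-- ===== PRECONDITION & SPEC =====
def Spec_parse_exp_modality_py (exp : String) (out : Option String × String) : Prop := out = parse_exp_modality_py_alt exp
instance (exp : String) (out : Option String × String) : Decidable (Spec_parse_exp_modality_py exp out) := by unfold Spec_parse_exp_modality_py; infer_instance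

-- ===== CLAIM (what is proved, stated in full; the proofs are below) =====
def Claim_equal_parse_exp_modality_py : Prop := ∀ (exp : String), Dom_parse_exp_modality_py exp → Spec_parse_exp_modality_py exp (parse_exp_modality_py exp)

-- ===== LEMMAS AND PROOFS =====

-- a singleton is a prefix iff it is the head
lemma pv_singleton_prefix (l : List Char) : ['_'] <+: l ↔ l.head? = some '_' := by
  cases l with
  | nil => simp
  | cons a t => simp [List.cons_prefix_cons, eq_comm]

-- a singleton is an infix iff it is a member
lemma pv_singleton_infix (l : List Char) : ['_'] <:+: l ↔ '_' ∈ l := by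
  constructor
  · intro h; exact h.mem (by simp)
  · intro h
    obtain ⟨a, b, rfl⟩ := List.append_of_mem h
    exact ⟨a, b, by simp⟩

-- with no underscore on either side, "starts with m_" pins down the part before the underscore
lemma pv_prefix_us {m p : List Char} (t : List Char) (hm : '_' ∉ m) (hp : '_' ∉ p) :
    (m ++ ['_']) <+: (p ++ '_' :: t) ↔ m = p := by
  induction m generalizing p with
  | nil =>
    cases p with
    | nil => simp
    | cons b p' =>
      simp only [List.nil_append, pv_singleton_prefix, List.cons_append, List.head?_cons]
      simp only [List.mem_cons, not_or] at hp
      constructor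
      · intro h; exact absurd (Option.some.inj h).symm hp.1
      · intro h; exact absurd h.symm (by simp)
  | cons a m' ih =>
    cases p with
    | nil =>
      simp only [List.mem_cons, not_or] at hm
      simp only [List.nil_append, List.cons_append, List.cons_prefix_cons]
      constructor
      · rintro ⟨rfl, -⟩; exact absurd rfl hm.1
      · intro h; exact absurd h (by simp)
    | cons b p' =>
      simp only [List.mem_cons, not_or] at hm hp
      simp only [List.cons_append, List.cons_prefix_cons]
      rw [ih hm.2 hp.2]
      constructor
      · rintro ⟨rfl, rfl⟩; rfl
      · intro h; cases h; exact ⟨rfl, rfl⟩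

-- A's loop when the string has no underscore: every prefix test fails
lemma pvALoop_no_us {cs : List Char} (h : '_' ∉ cs) (mods : List (List Char)) :
    pvALoop cs mods = (none, cs) := by
  induction mods with
  | nil => rfl
  | cons m rest ih =>
    have hsw : PySem.Chars.startswith cs (m ++ ['_']) = false := by
      by_contra hc
      have : PySem.Chars.startswith cs (m ++ ['_']) = true := by
        cases hb : PySem.Chars.startswith cs (m ++ ['_']) with
        | true => rfl
        | false => exact absurd hb hc
      exact h (((PySem.Chars.startswith_iff cs (m ++ ['_'])).1 this).mem (by simp))
    simpa [pvALoop, hsw] using ih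

-- A's loop on p ++ '_' :: t with no underscore in p or in any candidate modality
lemma pvALoop_us {p : List Char} (t : List Char) (hp : '_' ∉ p) :
    ∀ mods : List (List Char), (∀ m ∈ mods, '_' ∉ m) →
    pvALoop (p ++ '_' :: t) mods =
      if mods.contains p && pvSuffixMap.contains t then (some p, pvSuffixMap.getD t [])
      else (none, p ++ '_' :: t) := by
  intro mods
  induction mods with
  | nil => intro _; rfl
  | cons m rest ih =>
    intro hm
    have hm1 : '_' ∉ m := hm m (by simp)
    have hrest : ∀ m' ∈ rest, '_' ∉ m' := fun m' h' => hm m' (by simp [h'])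
    by_cases hmp : m = p
    · subst hmp
      have hsw : PySem.Chars.startswith (m ++ '_' :: t) (m ++ ['_']) = true :=
        (PySem.Chars.startswith_iff _ _).2 ((pv_prefix_us t hm1 hm1).2 rfl)
      have hslice : PySem.List.slice (m ++ '_' :: t) (some ((m ++ ['_']).length : Int)) = t := by
        rw [PySem.List.slice_from _ (by positivity), Int.toNat_natCast,
            show m ++ '_' :: t = (m ++ ['_']) ++ t by simp]
        exact List.drop_left
      by_cases hsuf : pvSuffixMap.contains t = true
      · simp only [pvALoop, hsw, if_true]
        rw [hslice, hsuf]
        simp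
      · have hsuf' : pvSuffixMap.contains t = false := by
          cases hb : pvSuffixMap.contains t with
          | true => exact absurd hb hsuf
          | false => rfl
        simp only [pvALoop, hsw, if_true]
        rw [hslice, hsuf']
        simp only [Bool.false_eq_true, if_false]
        rw [ih hrest]
        simp [hsuf']
    · have hsw : PySem.Chars.startswith (p ++ '_' :: t) (m ++ ['_']) = false := by
        by_contra hc
        have : PySem.Chars.startswith (p ++ '_' :: t) (m ++ ['_']) = true := by
          cases hb : PySem.Chars.startswith (p ++ '_' :: t) (m ++ ['_']) with
          | true => rfl
          | false => exact absurd hb hc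
        exact hmp ((pv_prefix_us t hm1 hp).1 ((PySem.Chars.startswith_iff _ _).1 this))
      have hcont : (m :: rest).contains p = rest.contains p := by
        simp [Ne.symm hmp]
      simp only [pvALoop, hsw, Bool.false_eq_true, if_false]
      rw [ih hrest, hcont]

-- no candidate modality contains an underscore
lemma pv_mods_no_us : ∀ m ∈ pvRawMods, '_' ∉ m := by decide

-- ===== VERDICT (by name: the statement is the Claim_ definition above) =====
theorem parse_exp_modality_py_spec : Claim_equal_parse_exp_modality_py := by
  intro exp _
  unfold Spec_parse_exp_modality_py
  by_cases hfind : PySem.Chars.find exp.toList ['_'] = -1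
  · -- no underscore: both return (None, exp)
    have hmem : '_' ∉ exp.toList := by
      intro hm
      exact ((PySem.Chars.find_eq_neg_one_iff exp.toList ['_']).1 hfind)
        ((pv_singleton_infix exp.toList).2 hm)
    unfold parse_exp_modality_py parse_exp_modality_py_alt
    rw [pvALoop_no_us hmem pvRawMods]
    simp [hfind, String.ofList_toList]
  · -- an underscore at index n = find exp ['_']: exp.toList = p ++ '_' :: t with p underscore-free
    have hpos : 0 ≤ PySem.Chars.find exp.toList ['_'] := by
      have h1 := PySem.Chars.neg_one_le_find exp.toList ['_']
      omega
    obtain ⟨hpre, hmin⟩ := PySem.Chars.find_spec hpos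
    obtain ⟨n, hn⟩ : ∃ n, (PySem.Chars.find exp.toList ['_']).toNat = n := ⟨_, rfl⟩
    rw [hn] at hpre hmin
    have hhead : (exp.toList.drop n).head? = some '_' := (pv_singleton_prefix _).1 hpre
    have hdecomp : exp.toList = exp.toList.take n ++ '_' :: exp.toList.drop (n + 1) := by
      cases hd : exp.toList.drop n with
      | nil => rw [hd] at hhead; simp at hhead
      | cons a t' =>
        rw [hd] at hhead
        simp only [List.head?_cons, Option.some.injEq] at hhead
        subst hhead
        have ht' : exp.toList.drop (n + 1) = t' := by
          have h1 : List.drop 1 (List.drop n exp.toList) = List.drop (n + 1) exp.toList :=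
            List.drop_drop
          rw [← h1, hd]
          rfl
        rw [ht']
        conv_lhs => rw [← List.take_append_drop n exp.toList]
        rw [hd]
    have hptake : '_' ∉ exp.toList.take n := by
      intro hm
      obtain ⟨j, hj, hget⟩ := List.mem_iff_getElem.1 hm
      have hjn : j < n := lt_of_lt_of_le hj (by simp [List.length_take])
      have hjlen : j < exp.toList.length := lt_of_lt_of_le hj (by simp [List.length_take])
      refine hmin j hjn ((pv_singleton_prefix _).2 ?_)
      rw [List.head?_drop]
      rw [List.getElem_take] at hget
      simp [List.getElem?_eq_getElem hjlen, hget]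
    unfold parse_exp_modality_py parse_exp_modality_py_alt
    rw [show pvALoop exp.toList pvRawMods
          = pvALoop (exp.toList.take n ++ '_' :: exp.toList.drop (n + 1)) pvRawMods by
        rw [← hdecomp]]
    rw [pvALoop_us (exp.toList.drop (n + 1)) hptake pvRawMods pv_mods_no_us]
    by_cases hc : exp.toList.take n ∈ pvRawMods ∧
        pvSuffixMap.contains (exp.toList.drop (n + 1)) = true
    · simp [hfind, hn, hc]
    · simp only [hfind, if_false, hn, List.isEmpty_cons, Bool.not_false, Bool.true_and]
      simp only [Bool.and_eq_true, List.contains_iff_mem]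
      rw [if_neg hc, if_neg hc, ← hdecomp, String.ofList_toList]
      simp
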